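-- pv_equiv track=rewrite | github.com/wozlsla/algorithm | ctest/programmers/reviews/140108_review.py | solution
-- ===== SOURCE A (Python) =====
-- from collections import deque
--
-- def solution(s):
--     s = deque(s)
--     x = not_x = cnt = 0
--     current_char = None
--
--     while s:
--         char = s.popleft()
--
--         if x == not_x:
--             cnt += 1
--             current_char = char
--             x = not_x = 0
--
--         if char == current_char:
--             x += 1
--         else:
--             not_x += 1
--
--     return cnt
-- ===== SOURCE B (Python) =====
-- def solution(s):
--     n = len(s)
--     i = cnt = 0
--     while i < n:
--         c = s[i]
--         cnt += 1
--         bal = 1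
--         j = i + 1
--         while j < n and bal != 0:
--             bal += 1 if s[j] == c else -1
--             j += 1
--         i = j
--     return cnt
-- ===== Notes on version B (the rewrite author's own statement) =====
-- stated objective: alternative
-- what changed: Replaces A's flat deque scan with flag-like state (same/diff counters reset when equal, current_char sentinel) by an explicit nested structure: an outer loop over group start indices and an inner scan maintaining a single signed balance that ends the group when it hits zero; the deque and the None sentinel disappear.
import Mathlib
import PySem

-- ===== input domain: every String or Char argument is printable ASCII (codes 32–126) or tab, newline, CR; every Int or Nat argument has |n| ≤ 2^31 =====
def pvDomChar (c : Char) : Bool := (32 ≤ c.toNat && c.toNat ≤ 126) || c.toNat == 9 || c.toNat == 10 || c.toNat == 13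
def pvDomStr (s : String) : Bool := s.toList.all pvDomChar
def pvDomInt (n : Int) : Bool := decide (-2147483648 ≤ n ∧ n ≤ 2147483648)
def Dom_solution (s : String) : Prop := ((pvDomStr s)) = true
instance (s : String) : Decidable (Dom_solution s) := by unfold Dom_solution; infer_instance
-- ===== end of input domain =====

-- B replaces A's flat deque scan (reset-on-equal-counts flag state) by an explicit
-- outer loop over group starts with an inner signed-balance scan; objective: alternative.

-- ===== PORT A =====
-- A's while loop over the deque, state (x, not_x, cnt, current_char)
def solLoopA : List Char → Int → Int → Int → Option Char → Int
  | [], _, _, cnt, _ => cnt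
  | ch :: rest, x, nx, cnt, cur =>
    let cnt' := if x == nx then cnt + 1 else cnt
    let cur' := if x == nx then some ch else cur
    let x0 := if x == nx then 0 else x
    let nx0 := if x == nx then 0 else nx
    if some ch == cur' then solLoopA rest (x0 + 1) nx0 cnt' cur'
    else solLoopA rest x0 (nx0 + 1) cnt' cur'

def solution (s : String) : Int := solLoopA s.toList 0 0 0 none

-- ===== PORT B =====
-- inner while loop: consume chars updating the signed balance, return the rest of the string
def solInnerB (c : Char) : List Char → Int → List Char
  | [], _ => []
  | ch :: rest, bal =>
    let bal' := if ch == c then bal + 1 else bal - 1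
    if bal' == 0 then rest else solInnerB c rest bal'

theorem solInnerB_length_le (c : Char) : ∀ (l : List Char) (bal : Int),
    (solInnerB c l bal).length ≤ l.length := by
  intro l
  induction l with
  | nil => intro bal; simp [solInnerB]
  | cons ch rest ih =>
    intro bal
    simp only [solInnerB]
    split
    all_goals split
    all_goals first
      | exact Nat.le_succ _
      | exact le_trans (ih _) (Nat.le_succ _)

-- outer while loop over group start positions
def solOuterB : List Char → Int → Int
  | [], cnt => cnt
  | ch :: rest, cnt => solOuterB (solInnerB ch rest 1) (cnt + 1)
termination_by l _ => l.length
decreasing_by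
  exact Nat.lt_succ_of_le (solInnerB_length_le _ _ _)

def solution_alt (s : String) : Int := solOuterB s.toList 0

-- ===== PRECONDITION & SPEC =====
def Spec_solution (s : String) (out : Int) : Prop := out = solution_alt s
instance (s : String) (out : Int) : Decidable (Spec_solution s out) := by unfold Spec_solution; infer_instance

-- ===== CLAIM (what is proved, stated in full; the proofs are below) =====
def Claim_equal_solution : Prop := ∀ (s : String), Dom_solution s → Spec_solution s (solution s)

-- ===== LEMMAS AND PROOFS =====

-- Mutual invariant: inside a group A's (x, nx) carries the signed balance x - nx;
-- at equal counts A starts a new group exactly like B's outer loop.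
theorem solLoop_eq (n : ℕ) : ∀ (l : List Char), l.length ≤ n →
    ((∀ (c : Char) (x nx cnt : Int), x ≠ nx →
        solLoopA l x nx cnt (some c) = solOuterB (solInnerB c l (x - nx)) cnt) ∧
     (∀ (x cnt : Int) (cur : Option Char), solLoopA l x x cnt cur = solOuterB l cnt)) := by
  induction n with
  | zero =>
    intro l hl
    have hnil : l = [] := List.eq_nil_of_length_eq_zero (Nat.le_zero.mp hl)
    subst hnil
    constructor
    · intro c x nx cnt _; simp [solLoopA, solInnerB, solOuterB]
    · intro x cnt cur; simp [solLoopA, solOuterB]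
  | succ n ih =>
    intro l hl
    constructor
    · intro c x nx cnt hxnx
      cases l with
      | nil => simp [solLoopA, solInnerB, solOuterB]
      | cons ch rest =>
        have hrest : rest.length ≤ n := Nat.le_of_succ_le_succ hl
        have hx : (x == nx) = false := by simp [hxnx]
        by_cases hch : ch = c
        · subst hch
          by_cases hz : x + 1 = nx
          · have h0 : (x - nx + 1 == 0) = true := by simp; omega
            simp [solLoopA, solInnerB, hx, h0]
            rw [show nx = x + 1 by omega]
            exact (ih rest hrest).2 (x + 1) cnt (some ch)
          · have h0 : (x - nx + 1 == 0) = false := by simp; omega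
            simp [solLoopA, solInnerB, hx, h0]
            rw [show x - nx + 1 = x + 1 - nx by omega]
            exact (ih rest hrest).1 ch (x + 1) nx cnt (by omega)
        · have hcc : (ch == c) = false := by simp [hch]
          by_cases hz : x = nx + 1
          · have h0 : (x - nx - 1 == 0) = true := by simp; omega
            simp [solLoopA, solInnerB, hx, hcc, h0]
            rw [show x = nx + 1 from hz]
            exact (ih rest hrest).2 (nx + 1) cnt (some c)
          · have h0 : (x - nx - 1 == 0) = false := by simp; omega
            simp [solLoopA, solInnerB, hx, hcc, h0]
            rw [show x - nx - 1 = x - (nx + 1) by omega]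
            exact (ih rest hrest).1 c x (nx + 1) cnt (by omega)
    · intro x cnt cur
      cases l with
      | nil => simp [solLoopA, solOuterB]
      | cons ch rest =>
        have hrest : rest.length ≤ n := Nat.le_of_succ_le_succ hl
        simp [solLoopA, solOuterB]
        have := (ih rest hrest).1 ch 1 0 (cnt + 1) (by omega)
        simpa using this

-- ===== VERDICT (by name: the statement is the Claim_ definition above) =====
theorem solution_spec : Claim_equal_solution := by
  intro s _
  unfold Spec_solution solution solution_alt
  exact (solLoop_eq s.toList.length s.toList le_rfl).2 0 0 none
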